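-- pv_equiv track=rewrite | github.com/Jackyzaz/LeetCode | 2103-Rings and Rods/solve.py | countPoints2
-- ===== SOURCE A (Python) =====
-- def countPoints2(rings: str) -> int:
--     lst=[]
--     rgb=[]
--     count=0
--     for i in range(1,len(rings),2):
--         rgb=[]
--         if rings[i] not in lst:
--             lst.append(rings[i])
--             for j in range(1,len(rings),2):
--                 if rings[j]==rings[i]:
--                     if rings[j-1]=='R':
--                         rgb.append(rings[j-1])
--                     if rings[j-1]=='G':
--                         rgb.append(rings[j-1])
--                     if rings[j-1]=='B':
--                         rgb.append(rings[j-1])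
--             if len(set(rgb))==3:
--                 count+=1
--     return count
-- ===== SOURCE B (Python) =====
-- def countPoints2(rings: str) -> int:
--     rods = {}
--     for i in range(1, len(rings), 2):
--         c, r = rings[i - 1], rings[i]
--         hr, hg, hb = rods.get(r, (False, False, False))
--         rods[r] = (hr or c == 'R', hg or c == 'G', hb or c == 'B')
--     return sum(1 for t in rods.values() if t == (True, True, True))
-- ===== Notes on version B (the rewrite author's own statement) =====
-- stated objective: faster
-- what changed: Replaced A's dedup list with nested full re-scan per new rod by a single pass building a dict from rod to a (hasR,hasG,hasB) triple, then counting values equal to (True,True,True).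
import Mathlib
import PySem

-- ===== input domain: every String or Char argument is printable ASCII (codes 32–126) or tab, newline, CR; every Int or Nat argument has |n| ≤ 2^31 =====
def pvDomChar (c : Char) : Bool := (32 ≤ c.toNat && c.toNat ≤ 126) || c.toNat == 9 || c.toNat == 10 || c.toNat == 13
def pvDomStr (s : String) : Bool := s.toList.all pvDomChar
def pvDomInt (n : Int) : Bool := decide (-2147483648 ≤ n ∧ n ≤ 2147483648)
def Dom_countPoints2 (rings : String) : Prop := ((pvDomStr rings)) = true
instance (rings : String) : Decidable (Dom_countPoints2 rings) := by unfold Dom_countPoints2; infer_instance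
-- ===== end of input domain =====

-- B replaces A's per-rod full re-scan by one dict-building pass (rod ↦ color triple); measured faster on large inputs.


-- ===== PORT A =====
def countPoints2 (rings : String) : Int :=
  let cs := rings.toList
  let n : Int := (cs.length : Int)
  let idxs := PySem.List.pyRange 1 n 2
  let st := idxs.foldl (fun (st : List Char × Int) i =>
    let lst := st.1
    let count := st.2
    let ci := PySem.List.pyGetD cs i ' '       -- rings[i]; i is always in range here
    if ci ∉ lst then
      let lst' := lst ++ [ci]
      let rgb := idxs.foldl (fun rgb j =>
        let cj := PySem.List.pyGetD cs j ' '
        if cj = ci then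
          let p := PySem.List.pyGetD cs (j - 1) ' '
          let rgb := if p = 'R' then rgb ++ [p] else rgb
          let rgb := if p = 'G' then rgb ++ [p] else rgb
          if p = 'B' then rgb ++ [p] else rgb
        else rgb) ([] : List Char)
      if (PySem.Set.ofList rgb).length = 3 then (lst', count + 1) else (lst', count)
    else (lst, count)) ([], 0)
  st.2

-- ===== PORT B =====
def countPoints2_alt (rings : String) : Int :=
  let cs := rings.toList
  let n : Int := (cs.length : Int)
  let rods := (PySem.List.pyRange 1 n 2).foldl
    (fun (d : PySem.Dict Char (Bool × Bool × Bool)) i =>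
      let c := PySem.List.pyGetD cs (i - 1) ' '
      let r := PySem.List.pyGetD cs i ' '
      let t := d.getD r (false, false, false)
      d.insert r (t.1 || c == 'R', t.2.1 || c == 'G', t.2.2 || c == 'B'))
    PySem.Dict.empty
  rods.values.foldl (fun acc t => if t = (true, true, true) then acc + 1 else acc) 0

-- ===== PRECONDITION & SPEC =====
def Spec_countPoints2 (rings : String) (out : Int) : Prop := out = countPoints2_alt rings
instance (rings : String) (out : Int) : Decidable (Spec_countPoints2 rings out) := by unfold Spec_countPoints2; infer_instance

-- ===== CLAIM (what is proved, stated in full; the proofs are below) =====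
def Claim_equal_countPoints2 : Prop := ∀ (rings : String), Dom_countPoints2 rings → Spec_countPoints2 rings (countPoints2 rings)

-- ===== LEMMAS AND PROOFS =====

-- Both ports, rewritten as folds over the list of (color, rod) pairs read off the string.
def pvPairs (cs : List Char) : List (Char × Char) :=
  (PySem.List.pyRange 1 (cs.length : Int) 2).map
    (fun i => (PySem.List.pyGetD cs (i - 1) ' ', PySem.List.pyGetD cs i ' '))

def pvRgbOf (ps : List (Char × Char)) (r : Char) : List Char :=
  ps.foldl (fun rgb p =>
    if p.2 = r then
      let rgb := if p.1 = 'R' then rgb ++ [p.1] else rgb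
      let rgb := if p.1 = 'G' then rgb ++ [p.1] else rgb
      if p.1 = 'B' then rgb ++ [p.1] else rgb
    else rgb) []

def pvStepA (ps : List (Char × Char)) (st : List Char × Int) (p : Char × Char) : List Char × Int :=
  if p.2 ∉ st.1 then
    if (PySem.Set.ofList (pvRgbOf ps p.2)).length = 3 then (st.1 ++ [p.2], st.2 + 1)
    else (st.1 ++ [p.2], st.2)
  else (st.1, st.2)

def pvStepB (d : PySem.Dict Char (Bool × Bool × Bool)) (p : Char × Char) :
    PySem.Dict Char (Bool × Bool × Bool) :=
  let t := d.getD p.2 (false, false, false)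
  d.insert p.2 (t.1 || p.1 == 'R', t.2.1 || p.1 == 'G', t.2.2 || p.1 == 'B')

def pvFull (ps : List (Char × Char)) (r : Char) : Bool :=
  decide (('R', r) ∈ ps) && decide (('G', r) ∈ ps) && decide (('B', r) ∈ ps)

set_option maxHeartbeats 1000000 in
lemma pvA_as_pairs (rings : String) :
    countPoints2 rings = ((pvPairs rings.toList).foldl (pvStepA (pvPairs rings.toList)) ([], 0)).2 := by
  unfold countPoints2 pvPairs pvStepA pvRgbOf
  simp only [List.foldl_map]

set_option maxHeartbeats 1000000 in
lemma pvB_as_pairs (rings : String) :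
    countPoints2_alt rings =
      (((pvPairs rings.toList).foldl pvStepB PySem.Dict.empty).values.foldl
        (fun acc t => if t = (true, true, true) then acc + 1 else acc) 0) := by
  unfold countPoints2_alt pvPairs pvStepB
  simp only [List.foldl_map]

-- membership in the rgb accumulator
lemma pvRgb_mem_aux (ps : List (Char × Char)) (r : Char) :
    ∀ (acc : List Char) (x : Char),
      x ∈ ps.foldl (fun rgb p =>
        if p.2 = r then
          let rgb := if p.1 = 'R' then rgb ++ [p.1] else rgb
          let rgb := if p.1 = 'G' then rgb ++ [p.1] else rgb
          if p.1 = 'B' then rgb ++ [p.1] else rgb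
        else rgb) acc ↔
      x ∈ acc ∨ ((x = 'R' ∨ x = 'G' ∨ x = 'B') ∧ (x, r) ∈ ps) := by
  induction ps with
  | nil => intro acc x; simp
  | cons p ps ih =>
    intro acc x
    simp only [List.foldl_cons]
    rw [ih]
    have hstep : (if p.2 = r then
          let rgb := if p.1 = 'R' then acc ++ [p.1] else acc
          let rgb := if p.1 = 'G' then rgb ++ [p.1] else rgb
          if p.1 = 'B' then rgb ++ [p.1] else rgb
        else acc) =
        if p.2 = r ∧ (p.1 = 'R' ∨ p.1 = 'G' ∨ p.1 = 'B') then acc ++ [p.1] else acc := by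
      by_cases h2 : p.2 = r <;> by_cases hR : p.1 = 'R' <;> by_cases hG : p.1 = 'G' <;>
        by_cases hB : p.1 = 'B' <;> simp_all
    rw [hstep]
    have hmemcons : ((x, r) ∈ p :: ps) ↔ ((x = p.1 ∧ r = p.2) ∨ (x, r) ∈ ps) := by
      simp [Prod.ext_iff]
    rw [hmemcons]
    by_cases hc : p.2 = r ∧ (p.1 = 'R' ∨ p.1 = 'G' ∨ p.1 = 'B')
    · rw [if_pos hc]
      simp only [List.mem_append, List.mem_singleton]
      constructor
      · rintro ((h | h) | h)
        · exact Or.inl h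
        · subst h; exact Or.inr ⟨hc.2, Or.inl ⟨rfl, hc.1.symm⟩⟩
        · exact Or.inr ⟨h.1, Or.inr h.2⟩
      · rintro (h | ⟨hcol, (⟨hx, _⟩ | hmem)⟩)
        · exact Or.inl (Or.inl h)
        · exact Or.inl (Or.inr hx)
        · exact Or.inr ⟨hcol, hmem⟩
    · rw [if_neg hc]
      constructor
      · rintro (h | h)
        · exact Or.inl h
        · exact Or.inr ⟨h.1, Or.inr h.2⟩
      · rintro (h | ⟨hcol, (⟨hx, hr⟩ | hmem)⟩)
        · exact Or.inl h
        · exact absurd ⟨hr.symm, by subst hx; exact hcol⟩ hc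
        · exact Or.inr ⟨hcol, hmem⟩

lemma pvRgb_mem (ps : List (Char × Char)) (r : Char) (x : Char) :
    x ∈ pvRgbOf ps r ↔ (x = 'R' ∨ x = 'G' ∨ x = 'B') ∧ (x, r) ∈ ps := by
  unfold pvRgbOf
  rw [pvRgb_mem_aux]
  simp

lemma pvLen3 (l : List Char) (hnd : l.Nodup) (hsub : ∀ x ∈ l, x = 'R' ∨ x = 'G' ∨ x = 'B') :
    l.length = 3 ↔ ('R' ∈ l ∧ 'G' ∈ l ∧ 'B' ∈ l) := by
  have hsub' : l.toFinset ⊆ ({'R', 'G', 'B'} : Finset Char) := by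
    intro x hx
    have := hsub x (List.mem_toFinset.mp hx)
    simp [this]
  have hcard : l.toFinset.card = l.length := List.toFinset_card_of_nodup hnd
  constructor
  · intro h3
    have heq : l.toFinset = ({'R', 'G', 'B'} : Finset Char) := by
      apply Finset.eq_of_subset_of_card_le hsub'
      rw [hcard, h3]; decide
    refine ⟨?_, ?_, ?_⟩ <;>
      · rw [← List.mem_toFinset, heq]; decide
  · rintro ⟨hr, hg, hb⟩
    have hle : ({'R', 'G', 'B'} : Finset Char) ⊆ l.toFinset := by
      intro x hx
      fin_cases hx <;> simp [hr, hg, hb]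
    have heq := Finset.Subset.antisymm hsub' hle
    rw [← hcard, heq]; decide

lemma pvCond_iff_full (ps : List (Char × Char)) (r : Char) :
    ((PySem.Set.ofList (pvRgbOf ps r)).length = 3) ↔ pvFull ps r = true := by
  have hnd := PySem.Set.nodup_ofList (pvRgbOf ps r)
  have hmem : ∀ x, x ∈ PySem.Set.ofList (pvRgbOf ps r) ↔ x ∈ pvRgbOf ps r := fun x =>
    PySem.Set.mem_ofList (pvRgbOf ps r) x
  rw [pvLen3 _ hnd (fun x hx => ((pvRgb_mem ps r x).mp ((hmem x).mp hx)).1)]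
  simp only [hmem, pvRgb_mem, pvFull]
  simp only [decide_eq_true_eq, Bool.and_eq_true]
  tauto

-- A's loop invariant: the seen list is Set.update, the count counts full rods among new ones.
lemma pvA_loop (ps : List (Char × Char)) :
    ∀ (ps' : List (Char × Char)) (lst : List Char) (c : Int),
      ps'.foldl (pvStepA ps) (lst, c) =
        (PySem.Set.update lst (ps'.map Prod.snd),
         c + ((PySem.Set.update lst (ps'.map Prod.snd)).countP
                (fun r => pvFull ps r) : Int)
           - (lst.countP (fun r => pvFull ps r) : Int)) := by
  intro ps'
  induction ps' with
  | nil => intro lst c; simp [PySem.Set.update]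
  | cons p ps' ih =>
    intro lst c
    simp only [List.foldl_cons, List.map_cons]
    have hupd : PySem.Set.update lst (p.2 :: ps'.map Prod.snd) =
        PySem.Set.update (PySem.Set.add lst p.2) (ps'.map Prod.snd) := by
      simp [PySem.Set.update]
    by_cases h : p.2 ∈ lst
    · have hcadd : PySem.Set.add lst p.2 = lst := by
        simp [PySem.Set.add]
        exact h
      have hstep : pvStepA ps (lst, c) p = (lst, c) := by
        simp [pvStepA, h]
      rw [hstep, hupd, hcadd, ih]
    · have hcadd : PySem.Set.add lst p.2 = lst ++ [p.2] := by
        simp [PySem.Set.add]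
        exact h
      have hstep : pvStepA ps (lst, c) p =
          (lst ++ [p.2], if (PySem.Set.ofList (pvRgbOf ps p.2)).length = 3 then c + 1 else c) := by
        simp only [pvStepA, h, not_false_eq_true, if_pos]
        split_ifs <;> rfl
      rw [hstep, hupd, hcadd, ih]
      congr 1
      have hcnt : ((lst ++ [p.2]).countP (fun r => pvFull ps r) : Int)
          = (lst.countP (fun r => pvFull ps r) : Int)
            + (if (PySem.Set.ofList (pvRgbOf ps p.2)).length = 3 then 1 else 0) := by
        rw [List.countP_append]
        by_cases hfull : pvFull ps p.2 = true
        · rw [if_pos ((pvCond_iff_full ps p.2).mpr hfull)]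
          simp [hfull]
        · rw [if_neg (fun hl => hfull ((pvCond_iff_full ps p.2).mp hl))]
          simp [hfull]
      rw [hcnt]
      split_ifs <;> ring

-- B's dict invariant
lemma pvB_getD (ps' : List (Char × Char)) :
    ∀ (d : PySem.Dict Char (Bool × Bool × Bool)) (x : Char),
      (ps'.foldl pvStepB d).getD x (false, false, false) =
        ((d.getD x (false, false, false)).1 || decide (('R', x) ∈ ps'),
         (d.getD x (false, false, false)).2.1 || decide (('G', x) ∈ ps'),
         (d.getD x (false, false, false)).2.2 || decide (('B', x) ∈ ps')) := by
  induction ps' with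
  | nil => intro d x; simp
  | cons p ps' ih =>
    intro d x
    simp only [List.foldl_cons]
    rw [ih]
    by_cases hx : x = p.2
    · subst hx
      simp only [pvStepB, PySem.Dict.getD_insert_self]
      have eR : (p.1 == 'R') = decide (p.1 = 'R') := by
        by_cases hR : p.1 = 'R' <;> simp [hR]
      have eG : (p.1 == 'G') = decide (p.1 = 'G') := by
        by_cases hG : p.1 = 'G' <;> simp [hG]
      have eB : (p.1 == 'B') = decide (p.1 = 'B') := by
        by_cases hB : p.1 = 'B' <;> simp [hB]
      have hmR : decide (('R', p.2) ∈ p :: ps') = (decide (p.1 = 'R') || decide (('R', p.2) ∈ ps')) := by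
        by_cases hR : p.1 = 'R'
        · simp [List.mem_cons, Prod.ext_iff, hR]
        · simp [List.mem_cons, Prod.ext_iff, hR, Ne.symm hR]
      have hmG : decide (('G', p.2) ∈ p :: ps') = (decide (p.1 = 'G') || decide (('G', p.2) ∈ ps')) := by
        by_cases hG : p.1 = 'G'
        · simp [List.mem_cons, Prod.ext_iff, hG]
        · simp [List.mem_cons, Prod.ext_iff, hG, Ne.symm hG]
      have hmB : decide (('B', p.2) ∈ p :: ps') = (decide (p.1 = 'B') || decide (('B', p.2) ∈ ps')) := by
        by_cases hB : p.1 = 'B'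
        · simp [List.mem_cons, Prod.ext_iff, hB]
        · simp [List.mem_cons, Prod.ext_iff, hB, Ne.symm hB]
      simp only [eR, eG, eB, hmR, hmG, hmB, Bool.or_assoc]
    · simp only [pvStepB]
      rw [PySem.Dict.getD_insert, if_neg hx]
      have h1 : (('R', x) ∈ p :: ps') ↔ (('R', x) ∈ ps') := by
        simp [Prod.ext_iff]; intro _ h; exact absurd h hx
      have h2 : (('G', x) ∈ p :: ps') ↔ (('G', x) ∈ ps') := by
        simp [Prod.ext_iff]; intro _ h; exact absurd h hx
      have h3 : (('B', x) ∈ p :: ps') ↔ (('B', x) ∈ ps') := by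
        simp [Prod.ext_iff]; intro _ h; exact absurd h hx
      simp [h1, h2, h3]

lemma pvB_keys (ps : List (Char × Char)) :
    (ps.foldl pvStepB PySem.Dict.empty).keys = PySem.Set.ofList (ps.map Prod.snd) := by
  have := PySem.Dict.keys_foldl_insert_key (l := ps) (key := Prod.snd)
    (f := fun d p =>
      ((d.getD p.2 (false, false, false)).1 || p.1 == 'R',
       (d.getD p.2 (false, false, false)).2.1 || p.1 == 'G',
       (d.getD p.2 (false, false, false)).2.2 || p.1 == 'B'))
    (d := PySem.Dict.empty)
  simpa [pvStepB, PySem.Set.update, PySem.Set.ofList] using this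

lemma pvCount_fold (l : List (Bool × Bool × Bool)) :
    ∀ (a : Int), l.foldl (fun acc t => if t = (true, true, true) then acc + 1 else acc) a
      = a + (l.countP (fun t => t = (true, true, true)) : Int) := by
  induction l with
  | nil => intro a; simp
  | cons t l ih =>
    intro a
    simp only [List.foldl_cons, List.countP_cons]
    by_cases h : t = (true, true, true)
    · rw [if_pos h, ih]; simp [h]; ring
    · rw [if_neg h, ih]; simp [h]

-- ===== VERDICT (by name: the statement is the Claim_ definition above) =====
theorem countPoints2_spec : Claim_equal_countPoints2 := by
  unfold Claim_equal_countPoints2 Spec_countPoints2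
  intro rings _
  rw [pvA_as_pairs, pvB_as_pairs]
  set ps := pvPairs rings.toList with hps
  rw [pvA_loop ps ps [] 0]
  set d := ps.foldl pvStepB PySem.Dict.empty with hd
  have hnd : d.keys.Nodup := by
    rw [hd]
    exact PySem.Dict.nodup_keys_foldl_insert_key ps Prod.snd _ _ PySem.Dict.nodup_keys_empty
  have hvals : d.values = d.keys.map (fun k => d.getD k (false, false, false)) :=
    PySem.Dict.values_eq_map_keys d hnd (false, false, false)
  rw [hvals, pvCount_fold, List.countP_map]
  have hkeys : d.keys = PySem.Set.update [] (ps.map Prod.snd) := by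
    rw [hd, pvB_keys]
    simp [PySem.Set.update, PySem.Set.ofList]
  rw [hkeys]
  simp only [List.countP_nil, Nat.cast_zero, sub_zero, zero_add]
  congr 1
  apply List.countP_congr
  intro r _
  simp only [Function.comp_apply, hd, pvB_getD, PySem.Dict.getD_empty, Bool.false_or]
  unfold pvFull
  by_cases h1 : ('R', r) ∈ ps <;> by_cases h2 : ('G', r) ∈ ps <;> by_cases h3 : ('B', r) ∈ ps <;>
    simp [h1, h2, h3, Prod.ext_iff]
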